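-- pv_equiv track=rewrite | github.com/renzovc987/Bioapp | blast.py | extender_1_1
-- ===== SOURCE A (Python) =====
-- def evaluar(matrix, palabra, query):
--   contador = 0
--   for i in range(len(palabra)):
--     contador += matrix[palabra[i], query[i]]
--   return contador
--
-- def extender_1_1(palabra,  query, matrix, pos_palabra, pos_query, umbral=22):
--
--   pos_izq_query = pos_query[0]
--   pos_der_query = pos_query[1]
--
--   pos_izq_word = pos_palabra[0]
--   pos_der_word = pos_palabra[1]
--
--   value = evaluar(matrix, palabra[pos_izq_word:pos_der_word+1], query[pos_izq_query:pos_der_query+1])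
--   if value<umbral:
--     return (None, None, -1)
--
--
--
--   #Uno a Uno
--   while pos_izq_query >= 1 and pos_izq_word >= 1 and pos_der_word+1 < len(palabra) and pos_der_query+1 < len(query):
--     pos_izq_query-=1
--     pos_izq_word-=1
--     pos_der_word+=1
--     pos_der_query+=1
--
--     value = evaluar(matrix, palabra[pos_izq_word:pos_der_word+1], query[pos_izq_query:pos_der_query+1])
--
--     if value < umbral:
--       pos_der_word-=1
--       pos_der_query-=1
--       pos_izq_word+=1
--       pos_izq_query+=1
--       break
--
--   #Score Evaluacion
--   value = evaluar(matrix, palabra[pos_izq_word:pos_der_word+1], query[pos_izq_query:pos_der_query+1])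
--
--   return (palabra, palabra[pos_izq_word:pos_der_word+1], value)
-- ===== SOURCE B (Python) =====
-- def extender_1_1(palabra, query, matrix, pos_palabra, pos_query, umbral=22):
--     li_q, ld_q = pos_query[0], pos_query[1]
--     li_w, ld_w = pos_palabra[0], pos_palabra[1]
--
--     value = sum(matrix[a, b] for a, b in zip(palabra[li_w:ld_w + 1], query[li_q:ld_q + 1]))
--     if value < umbral:
--         return (None, None, -1)
--
--     d = 0
--     while li_q - d >= 1 and li_w - d >= 1 and ld_w + d + 1 < len(palabra) and ld_q + d + 1 < len(query):
--         step = matrix[palabra[li_w - d - 1], query[li_q - d - 1]] \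
--              + matrix[palabra[ld_w + d + 1], query[ld_q + d + 1]]
--         if value + step < umbral:
--             break
--         value += step
--         d += 1
--
--     return (palabra, palabra[li_w - d:ld_w + d + 1], value)
-- ===== Notes on version B (the rewrite author's own statement) =====
-- stated objective: alternative
-- what changed: B keeps a running alignment score and a single extension-offset counter: it scores the seed window once and per extension step adds only the two newly exposed matrix entries, instead of A's re-summing of the whole window with evaluar at every step (and once more at the end) while shifting four indices.
import Mathlib
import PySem

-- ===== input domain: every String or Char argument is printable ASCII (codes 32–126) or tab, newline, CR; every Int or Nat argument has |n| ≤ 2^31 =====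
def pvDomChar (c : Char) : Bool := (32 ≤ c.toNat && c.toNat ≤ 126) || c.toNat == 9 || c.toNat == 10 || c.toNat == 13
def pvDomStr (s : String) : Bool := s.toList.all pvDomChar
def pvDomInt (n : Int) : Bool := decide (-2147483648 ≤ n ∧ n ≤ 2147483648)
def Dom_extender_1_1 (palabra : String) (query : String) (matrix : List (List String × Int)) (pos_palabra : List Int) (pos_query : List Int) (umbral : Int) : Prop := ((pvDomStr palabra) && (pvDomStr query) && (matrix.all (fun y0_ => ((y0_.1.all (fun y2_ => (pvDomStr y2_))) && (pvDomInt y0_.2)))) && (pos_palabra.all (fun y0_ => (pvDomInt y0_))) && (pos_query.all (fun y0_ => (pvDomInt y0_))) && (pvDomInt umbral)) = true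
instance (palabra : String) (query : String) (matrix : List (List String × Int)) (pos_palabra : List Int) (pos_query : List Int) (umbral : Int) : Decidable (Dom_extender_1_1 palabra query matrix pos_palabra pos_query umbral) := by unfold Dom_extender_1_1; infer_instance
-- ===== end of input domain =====

-- B keeps a running alignment score and extends by an offset counter: per extension step it adds
-- only the two newly exposed matrix entries, instead of A's full re-summing of the window at every
-- step and once more at the end (objective: alternative — constant lookups per extension step).

-- ===== PORT A =====
-- matrix[k] with KeyError excluded by Pre_ (missing key yields 0 here, Python raises there)
def pvLook (matrix : List (List String × Int)) (k : List String) : Int :=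
  (((matrix.find? (fun p => p.1 == k)).map Prod.snd).getD 0)

-- the tuple key (s[i], t[j]) built from one-character strings
def pvKey (p q : List Char) (i j : Int) : List String :=
  [String.ofList [PySem.List.pyGetD p i ' '], String.ofList [PySem.List.pyGetD q j ' ']]

-- helper 'evaluar': for i in range(len(palabra)): contador += matrix[palabra[i], query[i]]
def pvEvaluar (matrix : List (List String × Int)) (p q : List Char) : Int :=
  (PySem.List.pyRange 0 (p.length : Int) 1).foldl
    (fun contador i => contador + pvLook matrix (pvKey p q i i)) 0

-- A's while loop; fuel (initial pos_izq_query.toNat + 1) only makes the recursion total: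
-- each iteration needs 1 ≤ l and decreases l by 1, so the fuel never runs out
def pvLoopA (matrix : List (List String × Int)) (umbral : Int) (pal ql : List Char) :
    Nat → Int → Int → Int → Int → Int × Int × Int × Int
  | 0, L, R, l, r => (L, R, l, r)
  | fuel + 1, L, R, l, r =>
    if 1 ≤ l ∧ 1 ≤ L ∧ R + 1 < (pal.length : Int) ∧ r + 1 < (ql.length : Int) then
      let value := pvEvaluar matrix (PySem.List.slice pal (some (L - 1)) (some (R + 2)))
                                    (PySem.List.slice ql (some (l - 1)) (some (r + 2)))
      if value < umbral then (L, R, l, r)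
      else pvLoopA matrix umbral pal ql fuel (L - 1) (R + 1) (l - 1) (r + 1)
    else (L, R, l, r)

def extender_1_1 (palabra : String) (query : String) (matrix : List (List String × Int)) (pos_palabra : List Int) (pos_query : List Int) (umbral : Int) : Option String × Option String × Int :=
  let pal := palabra.toList
  let ql := query.toList
  let piq := PySem.List.pyGetD pos_query 0 0
  let pdq := PySem.List.pyGetD pos_query 1 0
  let piw := PySem.List.pyGetD pos_palabra 0 0
  let pdw := PySem.List.pyGetD pos_palabra 1 0
  let value := pvEvaluar matrix (PySem.List.slice pal (some piw) (some (pdw + 1)))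
                                (PySem.List.slice ql (some piq) (some (pdq + 1)))
  if value < umbral then (none, none, -1)
  else
    let st := pvLoopA matrix umbral pal ql (piq.toNat + 1) piw pdw piq pdq
    let value2 := pvEvaluar matrix (PySem.List.slice pal (some st.1) (some (st.2.1 + 1)))
                                   (PySem.List.slice ql (some st.2.2.1) (some (st.2.2.2 + 1)))
    (some palabra, some (String.ofList (PySem.List.slice pal (some st.1) (some (st.2.1 + 1)))), value2)

-- ===== PORT B =====
-- matrix[a, b] on two characters (KeyError excluded by Pre_)
def pvEntry (matrix : List (List String × Int)) (a b : Char) : Int :=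
  (((matrix.find? (fun p => p.1 == [String.ofList [a], String.ofList [b]])).map Prod.snd).getD 0)

-- value = sum(matrix[a, b] for a, b in zip(palabra[li_w:ld_w+1], query[li_q:ld_q+1]))
def pvSeed (matrix : List (List String × Int)) (w s : List Char) : Int :=
  ((w.zip s).map (fun ab => pvEntry matrix ab.1 ab.2)).sum

-- B's while loop over the offset d with the running score v; only the two newly exposed
-- entries are looked up each step.  Fuel (initial li_q.toNat + 1) only makes it total:
-- each iteration needs 1 ≤ li_q - d and increases d, so the fuel never runs out.
def pvLoopB (matrix : List (List String × Int)) (umbral : Int) (pal ql : List Char)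
    (liw ldw liq ldq : Int) : Nat → Int → Int → Int × Int
  | 0, d, v => (d, v)
  | fuel + 1, d, v =>
    if 1 ≤ liq - d ∧ 1 ≤ liw - d ∧ ldw + d + 1 < (pal.length : Int) ∧ ldq + d + 1 < (ql.length : Int) then
      let step := pvEntry matrix (PySem.List.pyGetD pal (liw - d - 1) ' ') (PySem.List.pyGetD ql (liq - d - 1) ' ')
                + pvEntry matrix (PySem.List.pyGetD pal (ldw + d + 1) ' ') (PySem.List.pyGetD ql (ldq + d + 1) ' ')
      if v + step < umbral then (d, v)
      else pvLoopB matrix umbral pal ql liw ldw liq ldq fuel (d + 1) (v + step)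
    else (d, v)

def extender_1_1_alt (palabra : String) (query : String) (matrix : List (List String × Int)) (pos_palabra : List Int) (pos_query : List Int) (umbral : Int) : Option String × Option String × Int :=
  let pal := palabra.toList
  let ql := query.toList
  let liq := PySem.List.pyGetD pos_query 0 0
  let ldq := PySem.List.pyGetD pos_query 1 0
  let liw := PySem.List.pyGetD pos_palabra 0 0
  let ldw := PySem.List.pyGetD pos_palabra 1 0
  let value := pvSeed matrix (PySem.List.slice pal (some liw) (some (ldw + 1)))
                             (PySem.List.slice ql (some liq) (some (ldq + 1)))
  if value < umbral then (none, none, -1)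
  else
    let dv := pvLoopB matrix umbral pal ql liw ldw liq ldq (liq.toNat + 1) 0 value
    (some palabra, some (String.ofList (PySem.List.slice pal (some (liw - dv.1)) (some (ldw + dv.1 + 1)))), dv.2)

-- ===== PRECONDITION & SPEC =====
-- Pre_-side helpers (independent of both ports)
def pvKeyedB (matrix : List (List String × Int)) (a b : Char) : Bool :=
  matrix.any (fun p => p.1 == [String.ofList [a], String.ofList [b]])

def pvPreLook (matrix : List (List String × Int)) (a b : Char) : Int :=
  (((matrix.find? (fun p => p.1 == [String.ofList [a], String.ofList [b]])).map Prod.snd).getD 0)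

def pvPreZip (matrix : List (List String × Int)) (w s : List Char) : Int :=
  ((w.zip s).map (fun ab => pvPreLook matrix ab.1 ab.2)).sum

def pvPreScore (matrix : List (List String × Int)) (pal ql : List Char) (a b : Int) (n : Nat) : Int :=
  ((List.range n).map (fun j =>
    pvPreLook matrix (PySem.List.pyGetD pal (a + j) ' ') (PySem.List.pyGetD ql (b + j) ' '))).sum

def pvPreKeys (matrix : List (List String × Int)) (pal ql : List Char) (a b : Int) (n : Nat) : Bool :=
  (List.range n).all (fun j =>
    pvKeyedB matrix (PySem.List.pyGetD pal (a + j) ' ') (PySem.List.pyGetD ql (b + j) ' '))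

-- Pre_ excludes exactly: the inputs where A raises (position lists shorter than 2, a palabra
-- window longer than the query window, a matrix key missing in a window A actually re-scores
-- along its extension path), and the corner where the extension loop can run on an inverted
-- (left > right + 1) or unequal-offset seed window with a seed score reaching the threshold —
-- there A's positional re-pairing of the clamped slices and B's endpoint pairing are two equally
-- accidental readings of a malformed seed; see the cites.
def Pre_extender_1_1 (palabra : String) (query : String) (matrix : List (List String × Int)) (pos_palabra : List Int) (pos_query : List Int) (umbral : Int) : Prop :=
  let pal := palabra.toList
  let ql := query.toList
  let l := PySem.List.pyGetD pos_query 0 0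
  let r := PySem.List.pyGetD pos_query 1 0
  let L := PySem.List.pyGetD pos_palabra 0 0
  let R := PySem.List.pyGetD pos_palabra 1 0
  2 ≤ pos_palabra.length ∧ 2 ≤ pos_query.length ∧
  (PySem.List.slice pal (some L) (some (R + 1))).length ≤
    (PySem.List.slice ql (some l) (some (r + 1))).length ∧
  (∀ ab ∈ (PySem.List.slice pal (some L) (some (R + 1))).zip
            (PySem.List.slice ql (some l) (some (r + 1))),
      pvKeyedB matrix ab.1 ab.2 = true) ∧
  (¬ (1 ≤ l ∧ 1 ≤ L ∧ R + 1 < (pal.length : Int) ∧ r + 1 < (ql.length : Int)) ∨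
   pvPreZip matrix (PySem.List.slice pal (some L) (some (R + 1)))
                   (PySem.List.slice ql (some l) (some (r + 1))) < umbral ∨
   (L ≤ R + 1 ∧ R - L = r - l ∧
    ∀ k ∈ List.range (min (min L l) (min ((pal.length : Int) - 1 - R) ((ql.length : Int) - 1 - r))).toNat,
      (∀ m ∈ List.range k,
        umbral ≤ pvPreScore matrix pal ql (L - (m + 1)) (l - (m + 1)) ((R + 1 - L).toNat + 2 * (m + 1))) →
      pvPreKeys matrix pal ql (L - (k + 1)) (l - (k + 1)) ((R + 1 - L).toNat + 2 * (k + 1)) = true))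
instance (palabra : String) (query : String) (matrix : List (List String × Int)) (pos_palabra : List Int) (pos_query : List Int) (umbral : Int) : Decidable (Pre_extender_1_1 palabra query matrix pos_palabra pos_query umbral) := by unfold Pre_extender_1_1; infer_instance

def pvWitness_extender_1_1 : String × String × (List (List String × Int)) × List Int × List Int × Int :=
  ("ab", "ab", [(["a", "a"], 30), (["b", "b"], 30)], [0, 1], [0, 1], 22)

def Spec_extender_1_1 (palabra : String) (query : String) (matrix : List (List String × Int)) (pos_palabra : List Int) (pos_query : List Int) (umbral : Int) (out : Option String × Option String × Int) : Prop := out = extender_1_1_alt palabra query matrix pos_palabra pos_query umbral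
instance (palabra : String) (query : String) (matrix : List (List String × Int)) (pos_palabra : List Int) (pos_query : List Int) (umbral : Int) (out : Option String × Option String × Int) : Decidable (Spec_extender_1_1 palabra query matrix pos_palabra pos_query umbral out) := by unfold Spec_extender_1_1; infer_instance

-- ===== CLAIM (what is proved, stated in full; the proofs are below) =====
def Claim_equal_extender_1_1 : Prop := ∀ (palabra : String) (query : String) (matrix : List (List String × Int)) (pos_palabra : List Int) (pos_query : List Int) (umbral : Int), Dom_extender_1_1 palabra query matrix pos_palabra pos_query umbral → Pre_extender_1_1 palabra query matrix pos_palabra pos_query umbral → Spec_extender_1_1 palabra query matrix pos_palabra pos_query umbral (extender_1_1 palabra query matrix pos_palabra pos_query umbral)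

-- ===== LEMMAS AND PROOFS =====

-- the window score as a sum indexed from the original strings
def pvT (matrix : List (List String × Int)) (pal ql : List Char) (a b n : Nat) : Int :=
  ((List.range n).map (fun k =>
    pvEntry matrix (pal.getD (a + k) ' ') (ql.getD (b + k) ' '))).sum

theorem pvEvaluar_eq_sum (matrix : List (List String × Int)) (p q : List Char) :
    pvEvaluar matrix p q =
      ((List.range p.length).map (fun k =>
        pvEntry matrix (p.getD k ' ') (q.getD k ' '))).sum := by
  simp [pvEvaluar, PySem.List.foldl_add, PySem.List.pyRange_one, List.map_map, Function.comp_def,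
    pvKey, pvLook, pvEntry, PySem.List.pyGetD_natCast]

theorem pvSeed_eq_sum (matrix : List (List String × Int)) (w s : List Char)
    (h : w.length ≤ s.length) :
    pvSeed matrix w s =
      ((List.range w.length).map (fun k =>
        pvEntry matrix (w.getD k ' ') (s.getD k ' '))).sum := by
  rw [pvSeed]
  induction w generalizing s with
  | nil => simp
  | cons c w ih =>
    cases s with
    | nil => simp at h
    | cons d s =>
      simp only [List.zip_cons_cons, List.map_cons, List.sum_cons, List.length_cons,
        List.range_succ_eq_map, List.map_map, Function.comp_def, List.getD_cons_succ,
        List.getD_cons_zero]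
      rw [ih s (by simpa using h)]

theorem pvEvaluar_slice_eq_T (matrix : List (List String × Int)) (pal ql : List Char)
    (a b n : Nat) (_ha : a + n ≤ pal.length) (_hb : b + n ≤ ql.length) :
    pvEvaluar matrix (PySem.List.slice pal (some (a : Int)) (some ((a : Int) + (n : Int))))
                     (PySem.List.slice ql (some (b : Int)) (some ((b : Int) + (n : Int)))) =
      pvT matrix pal ql a b n := by
  rw [pvEvaluar_eq_sum, PySem.List.slice_natCast_add, PySem.List.slice_natCast_add, pvT]
  have hlen : ((pal.drop a).take n).length = n := by
    simp only [List.length_take, List.length_drop]; omega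
  rw [hlen]
  apply congrArg List.sum
  apply List.map_congr_left
  intro k hk
  rw [List.mem_range] at hk
  have h1 : ((pal.drop a).take n).getD k ' ' = pal.getD (a + k) ' ' := by
    simp [List.getD_eq_getElem?_getD, List.getElem?_drop, hk]
  have h2 : ((ql.drop b).take n).getD k ' ' = ql.getD (b + k) ' ' := by
    simp [List.getD_eq_getElem?_getD, List.getElem?_drop, hk]
  rw [h1, h2]

theorem pvT_expand (matrix : List (List String × Int)) (pal ql : List Char) (a b n : Nat) :
    pvT matrix pal ql a b (n + 2) =
      pvEntry matrix (pal.getD a ' ') (ql.getD b ' ') +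
      pvT matrix pal ql (a + 1) (b + 1) n +
      pvEntry matrix (pal.getD (a + 1 + n) ' ') (ql.getD (b + 1 + n) ' ') := by
  have hL : ∀ (a b m : Nat), pvT matrix pal ql a b (m + 1) =
      pvEntry matrix (pal.getD a ' ') (ql.getD b ' ') +
      pvT matrix pal ql (a + 1) (b + 1) m := by
    intro a b m
    rw [pvT, List.range_succ_eq_map, List.map_cons, List.map_map, List.sum_cons]
    simp only [Nat.add_zero]
    congr 1
    rw [pvT]
    apply congrArg List.sum
    apply List.map_congr_left
    intro k _
    simp only [Function.comp_def]
    have e1 : a + (k + 1) = a + 1 + k := by omega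
    have e2 : b + (k + 1) = b + 1 + k := by omega
    rw [e1, e2]
  have hR : pvT matrix pal ql (a + 1) (b + 1) (n + 1) = pvT matrix pal ql (a + 1) (b + 1) n +
      pvEntry matrix (pal.getD (a + 1 + n) ' ') (ql.getD (b + 1 + n) ' ') := by
    rw [pvT, List.range_succ, List.map_append, List.sum_append, ← pvT]
    simp only [List.map_cons, List.map_nil, List.sum_cons, List.sum_nil, add_zero]
  rw [show n + 2 = (n + 1) + 1 from rfl, hL, hR]
  ring

-- A's window score, as a function of the four positions
def pvW (matrix : List (List String × Int)) (pal ql : List Char) (L R l r : Int) : Int :=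
  pvEvaluar matrix (PySem.List.slice pal (some L) (some (R + 1)))
                   (PySem.List.slice ql (some l) (some (r + 1)))

theorem pvW_expand (matrix : List (List String × Int)) (pal ql : List Char) (L R l r : Int)
    (h : 0 ≤ L ∧ L ≤ R + 1 ∧ R < (pal.length : Int) ∧ 0 ≤ l ∧ r < (ql.length : Int) ∧ R - L = r - l)
    (hg : 1 ≤ l ∧ 1 ≤ L ∧ R + 1 < (pal.length : Int) ∧ r + 1 < (ql.length : Int)) :
    pvW matrix pal ql (L - 1) (R + 1) (l - 1) (r + 1) =
      pvW matrix pal ql L R l r +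
      (pvEntry matrix (PySem.List.pyGetD pal (L - 1) ' ') (PySem.List.pyGetD ql (l - 1) ' ') +
       pvEntry matrix (PySem.List.pyGetD pal (R + 1) ' ') (PySem.List.pyGetD ql (r + 1) ' ')) := by
  obtain ⟨h0L, hLR, hRlen, h0l, hrlen, hdiag⟩ := h
  obtain ⟨hg1, hg2, hg3, hg4⟩ := hg
  have e0 : pvW matrix pal ql L R l r = pvT matrix pal ql L.toNat l.toNat (R + 1 - L).toNat := by
    have ht := pvEvaluar_slice_eq_T matrix pal ql L.toNat l.toNat (R + 1 - L).toNat (by omega) (by omega)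
    rw [pvW, ← ht]
    congr 3 <;> omega
  have e1 : pvW matrix pal ql (L - 1) (R + 1) (l - 1) (r + 1) =
      pvT matrix pal ql (L - 1).toNat (l - 1).toNat ((R + 1 - L).toNat + 2) := by
    have ht := pvEvaluar_slice_eq_T matrix pal ql (L - 1).toNat (l - 1).toNat
      ((R + 1 - L).toNat + 2) (by omega) (by omega)
    rw [pvW, ← ht]
    congr 3 <;> push_cast <;> omega
  rw [e0, e1, pvT_expand]
  have kk : ∀ (xs : List Char) (i : Int) (M : Nat), i = (M : Int) →
      PySem.List.pyGetD xs i ' ' = xs.getD M ' ' := by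
    intro xs i M hi
    rw [hi, PySem.List.pyGetD_natCast]
  have k1 := kk pal (L - 1) (L - 1).toNat (by omega)
  have k2 := kk ql (l - 1) (l - 1).toNat (by omega)
  have k3 := kk pal (R + 1) ((L - 1).toNat + 1 + (R + 1 - L).toNat) (by push_cast; omega)
  have k4 := kk ql (r + 1) ((l - 1).toNat + 1 + (R + 1 - L).toNat) (by push_cast; omega)
  rw [k1, k2, k3, k4,
    show (L - 1).toNat + 1 = L.toNat from by omega,
    show (l - 1).toNat + 1 = l.toNat from by omega]
  ring

-- B's offset loop tracks A's four-index loop: after the same number of steps the four indices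
-- are the seed indices shifted by the offset, and B's running score is A's window score
theorem pvLoops_agree (matrix : List (List String × Int)) (umbral : Int) (pal ql : List Char)
    (L0 R0 l0 r0 : Int) :
    ∀ (fuel : Nat) (L R l r d v : Int),
      L = L0 - d → R = R0 + d → l = l0 - d → r = r0 + d →
      (0 ≤ L ∧ L ≤ R + 1 ∧ R < (pal.length : Int) ∧ 0 ≤ l ∧ r < (ql.length : Int) ∧ R - L = r - l) →
      v = pvW matrix pal ql L R l r →
      (pvLoopA matrix umbral pal ql fuel L R l r).1 =
        L0 - (pvLoopB matrix umbral pal ql L0 R0 l0 r0 fuel d v).1 ∧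
      (pvLoopA matrix umbral pal ql fuel L R l r).2.1 =
        R0 + (pvLoopB matrix umbral pal ql L0 R0 l0 r0 fuel d v).1 ∧
      (pvLoopB matrix umbral pal ql L0 R0 l0 r0 fuel d v).2 =
        pvW matrix pal ql (pvLoopA matrix umbral pal ql fuel L R l r).1
          (pvLoopA matrix umbral pal ql fuel L R l r).2.1
          (pvLoopA matrix umbral pal ql fuel L R l r).2.2.1
          (pvLoopA matrix umbral pal ql fuel L R l r).2.2.2 := by
  intro fuel
  induction fuel with
  | zero =>
    intro L R l r d v hLL hRR hll hrr _ hv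
    exact ⟨by simpa [pvLoopA, pvLoopB] using hLL, by simpa [pvLoopA, pvLoopB] using hRR,
      by simpa [pvLoopA, pvLoopB] using hv⟩
  | succ fuel ih =>
    intro L R l r d v hLL hRR hll hrr hgeom hv
    subst hLL; subst hRR; subst hll; subst hrr; subst hv
    rw [pvLoopA, pvLoopB]
    by_cases hgd : 1 ≤ l0 - d ∧ 1 ≤ L0 - d ∧ R0 + d + 1 < (pal.length : Int) ∧
        r0 + d + 1 < (ql.length : Int)
    · rw [if_pos hgd, if_pos hgd]
      have hexp := pvW_expand matrix pal ql (L0 - d) (R0 + d) (l0 - d) (r0 + d) hgeom hgd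
      have eA : pvEvaluar matrix (PySem.List.slice pal (some (L0 - d - 1)) (some (R0 + d + 2)))
                                 (PySem.List.slice ql (some (l0 - d - 1)) (some (r0 + d + 2))) =
          pvW matrix pal ql (L0 - d - 1) (R0 + d + 1) (l0 - d - 1) (r0 + d + 1) := by
        rw [pvW]
        congr 3 <;> ring
      simp only [eA]
      rw [hexp]
      by_cases hvlt : pvW matrix pal ql (L0 - d) (R0 + d) (l0 - d) (r0 + d) +
          (pvEntry matrix (PySem.List.pyGetD pal (L0 - d - 1) ' ') (PySem.List.pyGetD ql (l0 - d - 1) ' ') +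
           pvEntry matrix (PySem.List.pyGetD pal (R0 + d + 1) ' ') (PySem.List.pyGetD ql (r0 + d + 1) ' ')) < umbral
      · rw [if_pos hvlt, if_pos hvlt]
        exact ⟨rfl, rfl, rfl⟩
      · rw [if_neg hvlt, if_neg hvlt]
        have := ih (L0 - d - 1) (R0 + d + 1) (l0 - d - 1) (r0 + d + 1) (d + 1)
          (pvW matrix pal ql (L0 - d) (R0 + d) (l0 - d) (r0 + d) +
            (pvEntry matrix (PySem.List.pyGetD pal (L0 - d - 1) ' ') (PySem.List.pyGetD ql (l0 - d - 1) ' ') +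
             pvEntry matrix (PySem.List.pyGetD pal (R0 + d + 1) ' ') (PySem.List.pyGetD ql (r0 + d + 1) ' ')))
          (by ring) (by ring) (by ring) (by ring) (by obtain ⟨a1, a2, a3, a4, a5, a6⟩ := hgeom; refine ⟨by omega, by omega, by omega, by omega, by omega, by omega⟩)
          hexp.symm
        exact this
    · rw [if_neg hgd, if_neg hgd]
      exact ⟨rfl, rfl, rfl⟩

-- ===== VERDICT (by name: the statement is the Claim_ definition above) =====
theorem extender_1_1_spec : Claim_equal_extender_1_1 := by
  intro palabra query matrix pos_palabra pos_query umbral _ hpre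
  unfold Spec_extender_1_1
  obtain ⟨-, -, hlen, -, hcase⟩ := hpre
  simp only [extender_1_1, extender_1_1_alt]
  set pal := palabra.toList with hpal
  set ql := query.toList with hql
  set l := PySem.List.pyGetD pos_query 0 0 with hld
  set r := PySem.List.pyGetD pos_query 1 0 with hrd
  set L := PySem.List.pyGetD pos_palabra 0 0 with hLd
  set R := PySem.List.pyGetD pos_palabra 1 0 with hRd
  have hinit : pvSeed matrix (PySem.List.slice pal (some L) (some (R + 1)))
                             (PySem.List.slice ql (some l) (some (r + 1))) =
      pvEvaluar matrix (PySem.List.slice pal (some L) (some (R + 1)))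
                       (PySem.List.slice ql (some l) (some (r + 1))) := by
    rw [pvSeed_eq_sum _ _ _ hlen, pvEvaluar_eq_sum]
  rw [hinit]
  by_cases hv : pvEvaluar matrix (PySem.List.slice pal (some L) (some (R + 1)))
                                 (PySem.List.slice ql (some l) (some (r + 1))) < umbral
  · rw [if_pos hv, if_pos hv]
  · rw [if_neg hv, if_neg hv]
    by_cases hgd : 1 ≤ l ∧ 1 ≤ L ∧ R + 1 < (pal.length : Int) ∧ r + 1 < (ql.length : Int)
    · have hb : L ≤ R + 1 ∧ R - L = r - l := by
        rcases hcase with hg | hz | hpr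
        · exact absurd hgd hg
        · exfalso
          have : pvPreZip matrix (PySem.List.slice pal (some L) (some (R + 1)))
                                 (PySem.List.slice ql (some l) (some (r + 1))) =
              pvSeed matrix (PySem.List.slice pal (some L) (some (R + 1)))
                            (PySem.List.slice ql (some l) (some (r + 1))) := by
            simp [pvPreZip, pvSeed, pvPreLook, pvEntry]
          rw [this, hinit] at hz
          exact hv hz
        · exact ⟨hpr.1, hpr.2.1⟩
      have hv0 : pvEvaluar matrix (PySem.List.slice pal (some L) (some (R + 1)))
                                  (PySem.List.slice ql (some l) (some (r + 1))) =
          pvW matrix pal ql L R l r := rfl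
      obtain ⟨h1, h2, h3⟩ := pvLoops_agree matrix umbral pal ql L R l r (l.toNat + 1)
        L R l r 0 _ (by ring) (by ring) (by ring) (by ring)
        ⟨by omega, hb.1, by omega, by omega, by omega, hb.2⟩ hv0
      rw [← h1, h3, pvW]
      have h2' : R + (pvLoopB matrix umbral pal ql L R l r (l.toNat + 1) 0
          (pvEvaluar matrix (PySem.List.slice pal (some L) (some (R + 1)))
                           (PySem.List.slice ql (some l) (some (r + 1))))).1 + 1 =
          (pvLoopA matrix umbral pal ql (l.toNat + 1) L R l r).2.1 + 1 := by omega
      rw [h2']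
    · rw [pvLoopA, if_neg hgd, pvLoopB, if_neg (by
        intro hB
        exact hgd ⟨by omega, by omega, by omega, by omega⟩)]
      simp
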